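-- pv_equiv track=rewrite | github.com/code-winter/RegEx | main.py | fix_doubles
-- ===== SOURCE A (Python) =====
-- def fix_doubles(contacts):
--     """
--     Searches phonebook for any duplicate entries, merges any extra data to one entry and writes a new list without
--     duplicates
--     :param contacts: nested list with contacts
--     :return: list without duplicate entries
--     """
--     contacts_dirty = contacts
--     for pos, person in enumerate(contacts):
--         lastname = person[0]
--         name = person[1]
--         for entry, search in enumerate(contacts_dirty[pos + 1:]):
--             if lastname == search[0] and name == search[1]:
--                 for point, data in enumerate(search):
--                     if person[point] == '':
--                         person[point] = data
--     clean_dict = {}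
--     indexes = []
--     for pos, person in enumerate(contacts):
--         clean_dict.setdefault((person[0], person[1]), pos)
--     for val in clean_dict.values():
--         indexes.append(val)
--     contacts_clean = [[] for _ in range(len(indexes))]
--     for count in range(len(indexes)):
--         contacts_clean[count] = contacts[indexes[count]]
--     return contacts_clean
-- ===== SOURCE B (Python) =====
-- def fix_doubles(contacts):
--     """Single pass: group by (lastname, name) in a dict; the first occurrence is
--     kept and its empty fields are filled from later duplicates as they appear."""
--     merged = {}
--     for person in contacts:
--         key = (person[0], person[1])
--         kept = merged.get(key)
--         if kept is None:
--             merged[key] = person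
--         else:
--             merged[key] = [p if k == '' else k for k, p in zip(kept, person)] + kept[len(person):]
--     return list(merged.values())
-- ===== Notes on version B (the rewrite author's own statement) =====
-- stated objective: faster
-- what changed: Replaced A's quadratic rescan (for every contact, scan the whole tail for duplicates, then a second dedup pass over indexes) by a single left-to-right pass over the contacts keeping a dict from (lastname, name) to the merged first occurrence, whose empty fields are filled functionally as later duplicates appear.
import Mathlib
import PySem

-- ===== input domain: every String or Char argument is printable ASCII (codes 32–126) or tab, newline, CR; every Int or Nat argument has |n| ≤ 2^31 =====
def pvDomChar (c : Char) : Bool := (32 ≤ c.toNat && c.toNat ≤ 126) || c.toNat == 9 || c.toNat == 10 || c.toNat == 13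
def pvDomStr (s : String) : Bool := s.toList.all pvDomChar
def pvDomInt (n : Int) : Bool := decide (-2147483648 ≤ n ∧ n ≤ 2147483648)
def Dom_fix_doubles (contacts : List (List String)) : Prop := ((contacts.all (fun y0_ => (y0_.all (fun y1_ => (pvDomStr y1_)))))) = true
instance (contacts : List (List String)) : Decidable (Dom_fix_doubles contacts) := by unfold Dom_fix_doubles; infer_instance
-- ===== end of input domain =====

-- B replaces A's quadratic tail-rescan + index dedup by one dict-grouping pass (measurably
-- faster, asymptotic). Python A mutates the rows of `contacts` in place; the equivalence
-- proved here is about the RETURN value (the ports thread all state functionally).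

-- ===== PORT A =====
-- inner `for point, data in enumerate(search): if person[point] == '': person[point] = data`
def pvFillA (per2 : List String) (pd : Int × String) : List String :=
  if PySem.List.pyGetD per2 pd.1 "" = "" then PySem.List.pySetD per2 pd.1 pd.2 else per2

-- body of `for entry, search in enumerate(contacts_dirty[pos + 1:]): if lastname == search[0] and name == search[1]: …`
def pvInnerA (lastname name : String) (per search : List String) : List String :=
  if lastname = PySem.List.pyGetD search 0 "" ∧ name = PySem.List.pyGetD search 1 "" then
    (PySem.List.enumerate search).foldl pvFillA per
  else per

-- body of the outer `for pos, person in enumerate(contacts)` (the in-place update of contacts[pos])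
def pvStepA (cs : List (List String)) (pos : Nat) : List (List String) :=
  let person := cs.getD pos []
  let lastname := PySem.List.pyGetD person 0 ""   -- person[0]
  let name := PySem.List.pyGetD person 1 ""       -- person[1]
  cs.set pos ((PySem.List.slice cs (some ((pos : Int) + 1)) none).foldl (pvInnerA lastname name) person)

-- `for pos, person in enumerate(contacts)` iterates the live mutated list, whose length never
-- changes; it is ported as a fold over `List.range contacts.length` reading the current state.
def fix_doubles (contacts : List (List String)) : List (List String) :=
  let dirty := (List.range contacts.length).foldl pvStepA contacts
  -- clean_dict.setdefault((person[0], person[1]), pos) over enumerate(contacts)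
  let cleanDict := (PySem.List.enumerate dirty).foldl
    (fun d pp => d.setdefault (PySem.List.pyGetD pp.2 0 "", PySem.List.pyGetD pp.2 1 "") pp.1)
    PySem.Dict.empty
  -- for val in clean_dict.values(): indexes.append(val)
  let indexes := cleanDict.values
  -- contacts_clean = [[] for _ in range(len(indexes))]; contacts_clean[count] = contacts[indexes[count]]
  (List.range indexes.length).foldl
    (fun cc (count : Nat) =>
      PySem.List.pySetD cc (count : Int)
        (PySem.List.pyGetD dirty (PySem.List.pyGetD indexes (count : Int) 0) []))
    (List.replicate indexes.length [])

-- ===== PORT B =====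
-- `[p if k == '' else k for k, p in zip(kept, person)] + kept[len(person):]`
def pvMergeRows (kept person : List String) : List String :=
  ((kept.zip person).map (fun kp => if kp.1 = "" then kp.2 else kp.1))
    ++ PySem.List.slice kept (some (PySem.List.len person)) none

def pvStepB (merged : PySem.Dict (String × String) (List String)) (person : List String) :
    PySem.Dict (String × String) (List String) :=
  let key := (PySem.List.pyGetD person 0 "", PySem.List.pyGetD person 1 "")
  match merged.get? key with
  | none => merged.insert key person
  | some kept => merged.insert key (pvMergeRows kept person)

def fix_doubles_alt (contacts : List (List String)) : List (List String) :=
  (contacts.foldl pvStepB PySem.Dict.empty).values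

-- ===== PRECONDITION & SPEC =====
def pvKey (p : List String) : String × String :=
  (PySem.List.pyGetD p 0 "", PySem.List.pyGetD p 1 "")

-- Python A raises IndexError when a row has fewer than two fields (person[1]) or when a
-- later duplicate row is longer than the first row of its group (person[point]); Pre_
-- excludes exactly those inputs (A returns on all of its complement).
def Pre_fix_doubles (contacts : List (List String)) : Prop :=
  (∀ p ∈ contacts, 2 ≤ p.length) ∧
  List.Pairwise (fun p q => pvKey p = pvKey q → q.length ≤ p.length) contacts

instance (contacts : List (List String)) : Decidable (Pre_fix_doubles contacts) := by
  unfold Pre_fix_doubles; infer_instance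

def pvWitness_fix_doubles : List (List String) :=
  [["a", "b", "", "c"], ["a", "b", "x"], ["d", "e"]]

def Spec_fix_doubles (contacts : List (List String)) (out : List (List String)) : Prop :=
  out = fix_doubles_alt contacts
instance (contacts : List (List String)) (out : List (List String)) :
    Decidable (Spec_fix_doubles contacts out) := by unfold Spec_fix_doubles; infer_instance

-- ===== CLAIM (what is proved, stated in full; the proofs are below) =====
def Claim_equal_fix_doubles : Prop := ∀ (contacts : List (List String)),
  Dom_fix_doubles contacts → Pre_fix_doubles contacts →
  Spec_fix_doubles contacts (fix_doubles contacts)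

-- ===== LEMMAS AND PROOFS =====

-- the conditional fold A performs on one row (merge every later same-key row into it)
def pvF (x : List String) (xs : List (List String)) : List String :=
  xs.foldl (fun per q => if pvKey q = pvKey x then pvMergeRows per q else per) x

-- the whole first loop nest of A, structurally
def pvPhase1 : List (List String) → List (List String)
  | [] => []
  | x :: xs => pvF x xs :: pvPhase1 xs

-- A's second phase: keep the first row of each key, in first-occurrence order
def pvDedup : List (List String) → List (List String)
  | [] => []
  | x :: xs => x :: pvDedup (xs.filter (fun q => !(pvKey q == pvKey x)))
  termination_by l => l.length
  decreasing_by
    have h := List.length_filter_le (fun q => !(pvKey q.1 == pvKey x)) xs.attach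
    simp at h ⊢; omega

-- the common grouping recursion both programs compute
def pvGroup : List (List String) → List (List String)
  | [] => []
  | x :: xs =>
      (xs.filter (fun q => pvKey q == pvKey x)).foldl pvMergeRows x ::
        pvGroup (xs.filter (fun q => !(pvKey q == pvKey x)))
  termination_by l => l.length
  decreasing_by
    have h := List.length_filter_le (fun q => !(pvKey q.1 == pvKey x)) xs.attach
    simp at h ⊢; omega

-- B's merged value for one key
def pvMergeK (k : String × String) (l : List (List String)) : List String :=
  match l.filter (fun q => pvKey q == k) with
  | [] => []
  | f :: rest => rest.foldl pvMergeRows f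

theorem pvKey_def (p : List String) : pvKey p = (p.getD 0 "", p.getD 1 "") := by
  simp [pvKey, pysem]

theorem pvMergeRows_nil_left (m : List String) : pvMergeRows [] m = [] := by
  simp [pvMergeRows, pysem]

theorem pvMergeRows_nil_right (l : List String) : pvMergeRows l [] = l := by
  simp [pvMergeRows, pysem]

theorem pvMergeRows_cons_cons (a b : String) (l m : List String) :
    pvMergeRows (a :: l) (b :: m) = (if a = "" then b else a) :: pvMergeRows l m := by
  simp only [pvMergeRows, PySem.List.len_eq, List.zip_cons_cons, List.map_cons,
    PySem.List.slice_from_natCast, List.length_cons, List.drop_succ_cons, List.cons_append]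

theorem pvKey_mergeRows (per q : List String) (h : pvKey q = pvKey per) :
    pvKey (pvMergeRows per q) = pvKey per := by
  simp only [pvKey_def, Prod.mk.injEq] at h ⊢
  obtain ⟨h0, h1⟩ := h
  match per, q with
  | [], q => simp [pvMergeRows_nil_left]
  | a :: l, [] => simp [pvMergeRows_nil_right]
  | a :: l, b :: m =>
    rw [pvMergeRows_cons_cons]
    simp only [List.getD_cons_zero, List.getD_cons_succ] at h0 h1 ⊢
    subst h0
    constructor
    · split <;> simp_all
    · match l, m with
      | [], m => simp [pvMergeRows_nil_left]
      | a2 :: l2, [] => simp [pvMergeRows_nil_right]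
      | a2 :: l2, b2 :: m2 =>
        rw [pvMergeRows_cons_cons]
        simp only [List.getD_cons_zero] at h1 ⊢
        subst h1
        split <;> simp_all

theorem pvSetD_natCast {α : Type} (xs : List α) (n : Nat) (v : α) :
    PySem.List.pySetD xs (n : Int) v = xs.set n v := by
  simp only [PySem.List.pySetD, PySem.List.pySet?, PySem.List.pyIdx?]
  by_cases h : n < xs.length <;>
    simp [h, List.set_eq_of_length_le, Nat.le_of_not_lt]

-- the inner fill loop of A computes B's row merge
theorem pvFill_enum (search : List String) : ∀ (per : List String) (s : Nat),
    (PySem.List.enumerate search (s : Int)).foldl pvFillA per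
      = per.take s ++ pvMergeRows (per.drop s) search := by
  induction search with
  | nil =>
    intro per s
    simp [PySem.List.enumerate_nil, pvMergeRows_nil_right]
  | cons d ds ih =>
    intro per s
    rw [PySem.List.enumerate_cons, List.foldl_cons]
    have hstep : pvFillA per ((s : Int), d) = if per.getD s "" = "" then per.set s d else per := by
      simp [pvFillA, PySem.List.pyGetD_natCast]
    have hcast : ((s : Int) + 1) = ((s + 1 : Nat) : Int) := by push_cast; ring
    rw [hstep, hcast]
    by_cases hs : s < per.length
    · have hget : per.getD s "" = per[s] := List.getD_eq_getElem per "" hs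
      have hdrop : per.drop s = per[s] :: per.drop (s + 1) := List.drop_eq_getElem_cons hs
      have htklen : (per.take s).length = s := by simp [Nat.le_of_lt hs]
      by_cases he : per[s] = ""
      · rw [if_pos (by rw [hget]; exact he)]
        rw [ih (per.set s d) (s + 1)]
        have hset : per.set s d = per.take s ++ d :: per.drop (s + 1) := by
          rw [List.set_eq_take_append_cons_drop, if_pos hs]
        rw [hset, hdrop, pvMergeRows_cons_cons, if_pos he]
        rw [List.take_append, List.drop_append, htklen]
        rw [List.take_of_length_le (by omega : (List.take s per).length ≤ s + 1)]
        rw [List.drop_eq_nil_of_le (by omega : (List.take s per).length ≤ s + 1), List.nil_append]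
        simp
      · rw [if_neg (by rw [hget]; exact he)]
        rw [ih per (s + 1)]
        rw [hdrop, pvMergeRows_cons_cons, if_neg he]
        rw [List.take_add_one, List.getElem?_eq_getElem hs, Option.toList_some,
          ← List.append_cons]
    · have hle : per.length ≤ s := Nat.le_of_not_lt hs
      rw [if_pos (List.getD_eq_default per "" hle), List.set_eq_of_length_le hle]
      rw [ih per (s + 1)]
      rw [List.take_of_length_le hle, List.take_of_length_le (Nat.le_succ_of_le hle)]
      rw [List.drop_eq_nil_of_le hle, List.drop_eq_nil_of_le (Nat.le_succ_of_le hle)]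
      rw [pvMergeRows_nil_left, pvMergeRows_nil_left]

theorem pvInnerA_eq (x per q : List String) :
    pvInnerA (PySem.List.pyGetD x 0 "") (PySem.List.pyGetD x 1 "") per q
      = if pvKey q = pvKey x then pvMergeRows per q else per := by
  unfold pvInnerA
  have hc : (PySem.List.pyGetD x 0 "" = PySem.List.pyGetD q 0 "" ∧
      PySem.List.pyGetD x 1 "" = PySem.List.pyGetD q 1 "") ↔ pvKey q = pvKey x := by
    unfold pvKey; rw [Prod.mk.injEq]; constructor <;> exact fun h => ⟨h.1.symm, h.2.symm⟩
  have hfill := pvFill_enum q per 0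
  simp only [Nat.cast_zero, List.take_zero, List.drop_zero, List.nil_append] at hfill
  split <;> rename_i h
  · rw [if_pos (hc.mp h)] at *
    exact hfill
  · rw [if_neg (fun hk => h (hc.mpr hk))]

theorem pvKey_pvF (x : List String) (xs : List (List String)) :
    pvKey (pvF x xs) = pvKey x := by
  suffices h : ∀ (xs : List (List String)) (per : List String), pvKey per = pvKey x →
      pvKey (xs.foldl (fun per q => if pvKey q = pvKey x then pvMergeRows per q else per) per)
        = pvKey x by
    exact h xs x rfl
  intro xs
  induction xs with
  | nil => intro per h; simpa using h
  | cons q qs ih =>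
    intro per h
    rw [List.foldl_cons]
    by_cases hq : pvKey q = pvKey x
    · rw [if_pos hq]
      exact ih _ (by rw [pvKey_mergeRows per q (hq.trans h.symm)]; exact h)
    · rw [if_neg hq]; exact ih per h

theorem pvF_eq_filter (x : List String) (xs : List (List String)) :
    pvF x xs = (xs.filter (fun q => pvKey q == pvKey x)).foldl pvMergeRows x := by
  rw [pvF, List.foldl_filter]
  apply PySem.List.foldl_congr_mem
  intro per q _
  simp only [beq_iff_eq]

-- A's first loop nest equals pvPhase1
theorem pvStepA_eq (cs : List (List String)) (k : Nat) (hk : k < cs.length) :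
    pvStepA cs k = cs.set k (pvF cs[k] (cs.drop (k + 1))) := by
  unfold pvStepA pvF
  have hcast : ((k : Int) + 1) = ((k + 1 : Nat) : Int) := by push_cast; ring
  rw [hcast, PySem.List.slice_from_natCast, List.getD_eq_getElem cs [] hk]
  dsimp only
  congr 1
  apply PySem.List.foldl_congr_mem
  intro per q _
  exact pvInnerA_eq cs[k] per q

theorem pvPhase1_eq : ∀ (n k : Nat) (cs : List (List String)), cs.length = k + n →
    (List.range' k n).foldl pvStepA cs = cs.take k ++ pvPhase1 (cs.drop k) := by
  intro n
  induction n with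
  | zero =>
    intro k cs h
    rw [List.range'_zero, List.foldl_nil, List.drop_eq_nil_of_le (by omega)]
    rw [List.take_of_length_le (by omega), pvPhase1, List.append_nil]
  | succ n ih =>
    intro k cs h
    have hk : k < cs.length := by omega
    rw [List.range'_succ, List.foldl_cons, pvStepA_eq cs k hk]
    set v := pvF cs[k] (cs.drop (k + 1)) with hv
    have hset : cs.set k v = cs.take k ++ v :: cs.drop (k + 1) := by
      rw [List.set_eq_take_append_cons_drop, if_pos hk]
    have htklen : (cs.take k).length = k := by simp [Nat.le_of_lt hk]
    rw [ih (k + 1) (cs.set k v) (by simp; omega)]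
    rw [hset, List.take_append, List.drop_append, htklen]
    rw [List.take_of_length_le (by omega : (cs.take k).length ≤ k + 1)]
    rw [List.drop_eq_nil_of_le (by omega : (cs.take k).length ≤ k + 1), List.nil_append]
    have hdrop : cs.drop k = cs[k] :: cs.drop (k + 1) := List.drop_eq_getElem_cons hk
    rw [hdrop, pvPhase1]
    simp [← hv]

-- dropping all rows of one key commutes with pvPhase1
theorem pvPhase1_filter (x0 : List String) :
    ∀ (xs : List (List String)),
      (pvPhase1 xs).filter (fun q => !(pvKey q == pvKey x0))
        = pvPhase1 (xs.filter (fun q => !(pvKey q == pvKey x0))) := by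
  intro xs
  induction xs with
  | nil => rfl
  | cons x xs ih =>
    rw [pvPhase1, List.filter_cons, List.filter_cons]
    by_cases hx : pvKey x = pvKey x0
    · rw [show (!(pvKey (pvF x xs) == pvKey x0)) = false by rw [pvKey_pvF]; simp [hx]]
      rw [show (!(pvKey x == pvKey x0)) = false by simp [hx]]
      simp only [Bool.false_eq_true, if_false]
      exact ih
    · rw [show (!(pvKey (pvF x xs) == pvKey x0)) = true by rw [pvKey_pvF]; simp [hx]]
      rw [show (!(pvKey x == pvKey x0)) = true by simp [hx]]
      simp only [if_true]
      rw [pvPhase1, ih]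
      congr 1
      rw [pvF_eq_filter, pvF_eq_filter, List.filter_filter]
      congr 1
      apply List.filter_congr
      intro q _
      by_cases hq : pvKey q = pvKey x
      · simp [hq, hx]
      · simp [hq]

-- A's second phase equals pvDedup
theorem pvSetdefault_values (xs : List (List String)) :
    ∀ (s : Nat) (full : List (List String)) (d : PySem.Dict (String × String) Int),
      full.drop s = xs →
      ((PySem.List.enumerate xs (s : Int)).foldl
          (fun d pp => d.setdefault (PySem.List.pyGetD pp.2 0 "", PySem.List.pyGetD pp.2 1 "") pp.1)
          d).values.map (fun i => PySem.List.pyGetD full i [])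
        = d.values.map (fun i => PySem.List.pyGetD full i [])
            ++ pvDedup (xs.filter (fun q => !(d.contains (pvKey q)))) := by
  induction xs with
  | nil =>
    intro s full d h
    simp [PySem.List.enumerate_nil, pvDedup]
  | cons x xs ih =>
    intro s full d h
    have hcast : ((s : Int) + 1) = ((s + 1 : Nat) : Int) := by push_cast; ring
    rw [PySem.List.enumerate_cons, List.foldl_cons, hcast]
    have hdrop1 : full.drop (s + 1) = xs := by
      have h1 : full.drop (s + 1) = (full.drop s).drop 1 := by
        rw [List.drop_drop]
      rw [h1, h]; rfl
    have hsx : PySem.List.pyGetD full (s : Int) [] = x := by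
      rw [PySem.List.pyGetD_natCast, List.getD_eq_getElem?_getD]
      have h0 : (full.drop s)[0]? = some x := by rw [h]; rfl
      rw [List.getElem?_drop] at h0
      simpa using congrArg (fun o => o.getD ([] : List String)) h0
    have hkey : (PySem.List.pyGetD x 0 "", PySem.List.pyGetD x 1 "") = pvKey x := rfl
    rw [hkey]
    by_cases hc : d.contains (pvKey x) = true
    · rw [PySem.Dict.setdefault_of_contains d _ hc]
      rw [ih (s + 1) full d hdrop1, List.filter_cons]
      rw [show (!(d.contains (pvKey x))) = false by simp [hc]]
      simp only [Bool.false_eq_true, if_false]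
    · have hc' : d.contains (pvKey x) = false := by
        cases hcc : d.contains (pvKey x) with
        | true => exact absurd hcc hc
        | false => rfl
      rw [PySem.Dict.setdefault_of_not_contains d _ hc']
      rw [ih (s + 1) full (d.insert (pvKey x) (s : Int)) hdrop1]
      have hval : (d.insert (pvKey x) ((s : Nat) : Int)).values = d.values ++ [((s : Nat) : Int)] := by
        simp [PySem.Dict.values, PySem.Dict.items_insert_of_not_contains d _ hc']
      rw [hval, List.map_append, List.map_cons, List.map_nil, hsx]
      rw [List.filter_cons]
      rw [show (!(d.contains (pvKey x))) = true by simp [hc']]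
      simp only [if_true]
      rw [pvDedup, List.filter_filter]
      have hpred : (fun q => !((d.insert (pvKey x) ((s : Nat) : Int)).contains (pvKey q)))
          = fun q => ((!(pvKey q == pvKey x)) && (!(d.contains (pvKey q)))) := by
        funext q
        rw [PySem.Dict.contains_insert]
        simp [Bool.not_or]
      rw [hpred]
      simp [List.append_assoc]

-- the rebuild-by-index loop of A is a map over indexes
theorem pvRebuild (dirty : List (List String)) (indexes : List Int) :
    (List.range indexes.length).foldl
        (fun cc (count : Nat) =>
          PySem.List.pySetD cc (count : Int)
            (PySem.List.pyGetD dirty (PySem.List.pyGetD indexes (count : Int) 0) []))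
        (List.replicate indexes.length [])
      = indexes.map (fun i => PySem.List.pyGetD dirty i []) := by
  have aux : ∀ (n k : Nat) (pre : List (List String)), pre.length = k →
      (List.range' k n).foldl
          (fun cc (count : Nat) =>
            PySem.List.pySetD cc (count : Int)
              (PySem.List.pyGetD dirty (PySem.List.pyGetD indexes (count : Int) 0) []))
          (pre ++ List.replicate n [])
        = pre ++ (List.range' k n).map
            (fun (count : Nat) => PySem.List.pyGetD dirty (PySem.List.pyGetD indexes (count : Int) 0) []) := by
    intro n
    induction n with
    | zero => intro k pre _; simp
    | succ n ihn =>
      intro k pre hpre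
      rw [List.range'_succ, List.foldl_cons, List.map_cons, List.replicate_succ]
      set w := PySem.List.pyGetD dirty (PySem.List.pyGetD indexes ((k : Nat) : Int) 0) [] with hw
      have hset : (pre ++ ([] : List String) :: List.replicate n ([] : List String)).set k w
          = pre ++ w :: List.replicate n [] := by
        rw [List.set_eq_take_append_cons_drop,
          if_pos (by rw [List.length_append, List.length_cons, List.length_replicate]; omega)]
        have e1 : List.take k pre = pre := List.take_of_length_le (le_of_eq hpre)
        have e2 : List.drop (k + 1) pre = [] := List.drop_eq_nil_of_le (by omega)
        rw [List.take_append, List.drop_append, e1, e2, hpre, Nat.sub_self]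
        simp
      rw [pvSetD_natCast, hset, List.append_cons pre w (List.replicate n []),
        ihn (k + 1) (pre ++ [w]) (by simp [hpre])]
      simp [List.append_assoc]
  have h0 := aux indexes.length 0 [] rfl
  rw [List.nil_append, List.nil_append, ← List.range_eq_range'] at h0
  rw [h0]
  have h1 : (List.range indexes.length).map (fun c => indexes.getD c 0) = indexes := by
    apply List.ext_getElem (by simp)
    intro i hh1 hh2
    simp [List.getD_eq_getElem?_getD, List.getElem?_eq_getElem hh2]
  have h2 : (fun (count : Nat) => PySem.List.pyGetD dirty (PySem.List.pyGetD indexes (count : Int) 0) [])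
      = (fun i => PySem.List.pyGetD dirty i []) ∘ (fun c => indexes.getD c 0) := by
    funext count
    rw [Function.comp_apply, PySem.List.pyGetD_natCast]
  rw [h2, ← List.map_map, h1]

theorem fix_doubles_eq_dedup (l : List (List String)) :
    fix_doubles l = pvDedup (pvPhase1 l) := by
  unfold fix_doubles
  have h1 : (List.range l.length).foldl pvStepA l = pvPhase1 l := by
    rw [List.range_eq_range', pvPhase1_eq l.length 0 l (by omega)]
    simp
  rw [h1, pvRebuild]
  have h2 := pvSetdefault_values (pvPhase1 l) 0 (pvPhase1 l) PySem.Dict.empty (by simp)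
  simp only [Nat.cast_zero] at h2
  rw [h2]
  have h3 : (pvPhase1 l).filter
      (fun q => !((PySem.Dict.empty : PySem.Dict (String × String) Int).contains (pvKey q)))
        = pvPhase1 l := by
    apply List.filter_eq_self.mpr
    intro q _
    simp [PySem.Dict.contains_empty]
  rw [h3]
  simp [PySem.Dict.values, PySem.Dict.empty]

theorem pvDedup_phase1_aux : ∀ (n : Nat) (l : List (List String)), l.length ≤ n →
    pvDedup (pvPhase1 l) = pvGroup l := by
  intro n
  induction n with
  | zero =>
    intro l h
    rw [List.length_eq_zero_iff.mp (Nat.le_zero.mp h)]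
    simp [pvPhase1, pvDedup, pvGroup]
  | succ n ihn =>
    intro l h
    match l with
    | [] => simp [pvPhase1, pvDedup, pvGroup]
    | x :: xs =>
      rw [pvPhase1, pvDedup, pvGroup, pvKey_pvF, pvPhase1_filter x xs]
      congr 1
      · exact pvF_eq_filter x xs
      · exact ihn _ (le_trans (List.length_filter_le _ _) (by simpa using h))

theorem pvDedup_phase1 : ∀ (l : List (List String)), pvDedup (pvPhase1 l) = pvGroup l :=
  fun l => pvDedup_phase1_aux l.length l le_rfl

-- B side
theorem pvStepB_insert (d : PySem.Dict (String × String) (List String)) (p : List String) :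
    pvStepB d p = d.insert (pvKey p)
      (match d.get? (pvKey p) with
       | none => p
       | some kept => pvMergeRows kept p) := by
  unfold pvStepB pvKey
  cases h : d.get? (PySem.List.pyGetD p 0 "", PySem.List.pyGetD p 1 "") <;> simp [h]

theorem pvG1 : ∀ (l : List (List String)) (d : PySem.Dict (String × String) (List String))
    (k : String × String) (a : List String), d.get? k = some a →
    (l.foldl pvStepB d).getD k [] = (l.filter (fun q => pvKey q == k)).foldl pvMergeRows a := by
  intro l
  induction l with
  | nil =>
    intro d k a h
    rw [List.foldl_nil, List.filter_nil, List.foldl_nil]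
    exact PySem.Dict.getD_of_get?_eq_some _ _ h
  | cons x xs ih =>
    intro d k a h
    rw [List.foldl_cons, pvStepB_insert, List.filter_cons]
    by_cases hx : pvKey x = k
    · subst hx
      rw [h, show (pvKey x == pvKey x) = true by simp]
      simp only [if_true]
      rw [List.foldl_cons]
      exact ih _ _ _ (PySem.Dict.get?_insert_self _ _ _)
    · rw [show (pvKey x == k) = false by simp [hx]]
      simp only [Bool.false_eq_true, if_false]
      exact ih _ _ _ (by rw [PySem.Dict.get?_insert_of_ne _ _ (Ne.symm hx)]; exact h)

theorem pvG2 : ∀ (l : List (List String)) (d : PySem.Dict (String × String) (List String))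
    (k : String × String), d.get? k = none →
    (l.foldl pvStepB d).getD k [] = pvMergeK k l := by
  intro l
  induction l with
  | nil =>
    intro d k h
    rw [List.foldl_nil]
    rw [PySem.Dict.getD_of_get?_eq_none _ _ h]
    rfl
  | cons x xs ih =>
    intro d k h
    rw [List.foldl_cons, pvStepB_insert]
    by_cases hx : pvKey x = k
    · subst hx
      rw [h]
      have h2 := pvG1 xs (d.insert (pvKey x) x) (pvKey x) x (PySem.Dict.get?_insert_self _ _ _)
      rw [h2]
      unfold pvMergeK
      rw [List.filter_cons, show (pvKey x == pvKey x) = true by simp]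
      simp only [if_true]
    · have h2 : (d.insert (pvKey x)
          (match d.get? (pvKey x) with | none => x | some kept => pvMergeRows kept x)).get? k
            = none := by
        rw [PySem.Dict.get?_insert_of_ne _ _ (Ne.symm hx)]; exact h
      rw [ih _ _ h2]
      unfold pvMergeK
      rw [List.filter_cons, show (pvKey x == k) = false by simp [hx]]
      simp only [Bool.false_eq_true, if_false]

theorem pvSet_update_cons {α : Type} [BEq α] [LawfulBEq α] (x : α) :
    ∀ (m s : List α), PySem.Set.update (x :: s) m
      = x :: PySem.Set.update s (m.filter (fun b => !(b == x))) := by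
  intro m
  induction m with
  | nil => intro s; rfl
  | cons b m ih =>
    intro s
    rw [show PySem.Set.update (x :: s) (b :: m)
        = PySem.Set.update (PySem.Set.add (x :: s) b) m from rfl]
    rw [List.filter_cons]
    by_cases hbx : b = x
    · subst hbx
      rw [show PySem.Set.add (b :: s) b = b :: s by
        simp [PySem.Set.add, PySem.Set.contains]]
      rw [show (!(b == b)) = false by simp]
      simp only [Bool.false_eq_true, if_false]
      exact ih s
    · rw [show (!(b == x)) = true by simp [hbx]]
      simp only [if_true]
      have hadd : PySem.Set.add (x :: s) b = x :: PySem.Set.add s b := by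
        have hmem : (b ∈ (x :: s)) ↔ (b ∈ s) := by simp [List.mem_cons, hbx]
        by_cases hc : b ∈ s
        · simp [PySem.Set.add, PySem.Set.contains, hc, hmem.mpr hc]
        · have h1 : ¬ b ∈ (x :: s) := fun hh => hc (hmem.mp hh)
          simp [PySem.Set.add, PySem.Set.contains, hc, h1]
      rw [hadd]
      rw [show (x :: PySem.Set.update s (b :: m.filter (fun c => !(c == x))))
          = x :: PySem.Set.update (PySem.Set.add s b) (m.filter (fun c => !(c == x))) from rfl]
      exact ih (PySem.Set.add s b)

theorem pvSet_ofList_cons {α : Type} [BEq α] [LawfulBEq α] (a : α) (m : List α) :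
    PySem.Set.ofList (a :: m) = a :: PySem.Set.ofList (m.filter (fun b => !(b == a))) := by
  rw [show PySem.Set.ofList (a :: m)
      = PySem.Set.update (PySem.Set.add PySem.Set.empty a) m from rfl]
  rw [show PySem.Set.add PySem.Set.empty a = [a] by
    simp [PySem.Set.add, PySem.Set.contains, PySem.Set.empty]]
  rw [show ([a] : List α) = a :: ([] : List α) from rfl]
  rw [pvSet_update_cons a m []]
  rfl

theorem fix_doubles_alt_eq_map (l : List (List String)) :
    fix_doubles_alt l = (PySem.Set.ofList (l.map pvKey)).map (fun k => pvMergeK k l) := by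
  unfold fix_doubles_alt
  have hfold : l.foldl pvStepB PySem.Dict.empty
      = l.foldl (fun d p => d.insert (pvKey p)
          ((fun d p => match PySem.Dict.get? d (pvKey p) with
            | none => p
            | some kept => pvMergeRows kept p) d p)) PySem.Dict.empty := by
    apply PySem.List.foldl_congr_mem
    intro acc x _
    exact pvStepB_insert acc x
  have hnodup : (l.foldl pvStepB PySem.Dict.empty).keys.Nodup := by
    rw [hfold]
    exact PySem.Dict.nodup_keys_foldl_insert_key l pvKey _ _ PySem.Dict.nodup_keys_empty
  have hkeys : (l.foldl pvStepB PySem.Dict.empty).keys = PySem.Set.ofList (l.map pvKey) := by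
    rw [hfold, PySem.Dict.keys_foldl_insert_key, PySem.Dict.keys_empty]
    rfl
  rw [PySem.Dict.values_eq_map_keys _ hnodup [], hkeys]
  apply List.map_congr_left
  intro k _
  exact pvG2 l PySem.Dict.empty k (PySem.Dict.get?_empty k)

theorem pvGroup_eq_map_aux : ∀ (n : Nat) (l : List (List String)), l.length ≤ n →
    pvGroup l = (PySem.Set.ofList (l.map pvKey)).map (fun k => pvMergeK k l) := by
  intro n
  induction n with
  | zero =>
    intro l h
    rw [List.length_eq_zero_iff.mp (Nat.le_zero.mp h)]
    simp [pvGroup, PySem.Set.ofList, PySem.Set.empty]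
  | succ n ihn =>
    intro l h
    match l with
    | [] => simp [pvGroup, PySem.Set.ofList, PySem.Set.empty]
    | x :: xs =>
      rw [pvGroup, List.map_cons, pvSet_ofList_cons, List.map_cons]
      congr 1
      · have hh : pvMergeK (pvKey x) (x :: xs)
            = (xs.filter (fun q => pvKey q == pvKey x)).foldl pvMergeRows x := by
          unfold pvMergeK
          rw [List.filter_cons, show (pvKey x == pvKey x) = true by simp]
          simp only [if_true]
        rw [hh]
      · have hmf : (xs.map pvKey).filter (fun b => !(b == pvKey x))
            = (xs.filter (fun q => !(pvKey q == pvKey x))).map pvKey := by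
          rw [List.filter_map]
          rfl
        rw [hmf]
        rw [ihn (xs.filter (fun q => !(pvKey q == pvKey x)))
          (le_trans (List.length_filter_le _ _) (by simpa using h))]
        apply List.map_congr_left
        intro k hk
        have hkne : k ≠ pvKey x := by
          have hm := (PySem.Set.mem_ofList _ k).mp hk
          obtain ⟨q, hq, rfl⟩ := List.mem_map.mp hm
          simpa using List.of_mem_filter hq
        unfold pvMergeK
        rw [List.filter_cons, show (pvKey x == k) = false by
          simp only [beq_eq_false_iff_ne]; exact Ne.symm hkne]
        simp only [Bool.false_eq_true, if_false]
        rw [List.filter_filter]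
        have hfe : (xs.filter (fun q => (pvKey q == k) && !(pvKey q == pvKey x)))
            = xs.filter (fun q => pvKey q == k) := by
          apply List.filter_congr
          intro q _
          by_cases hq : pvKey q = k
          · simp [hq, hkne]
          · simp [hq]
        rw [hfe]

theorem pvGroup_eq_map : ∀ (l : List (List String)),
    pvGroup l = (PySem.Set.ofList (l.map pvKey)).map (fun k => pvMergeK k l) :=
  fun l => pvGroup_eq_map_aux l.length l le_rfl

theorem fix_doubles_eq_alt (l : List (List String)) : fix_doubles l = fix_doubles_alt l := by
  rw [fix_doubles_eq_dedup, pvDedup_phase1, pvGroup_eq_map, ← fix_doubles_alt_eq_map]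

-- ===== VERDICT (by name: the statement is the Claim_ definition above) =====
theorem fix_doubles_spec : Claim_equal_fix_doubles := by
  intro contacts _ _
  exact fix_doubles_eq_alt contacts
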